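-- pv_equiv track=rewrite | github.com/Agurato/AdventOfCode2019 | python/src/day15.py | disp_map
-- ===== SOURCE A (Python) =====
-- def disp_map(tiles, robot_x, robot_y):
--     min_x, max_x, min_y, max_y = 0, 0, 0, 0
--     for key in tiles:
--         min_x = min(min_x, key[0])
--         max_x = max(max_x, key[0])
--         min_y = min(min_y, key[1])
--         max_y = max(max_y, key[1])
--     disp = ""
--     for y in range(min_y, max_y + 1):
--         for x in range(min_x, max_x + 1):
--             if x == robot_x and y == robot_y:
--                 disp += "D"
--             elif x == 0 and y == 0:
--                 disp += "C"
--             elif (x, y) in tiles: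
--                 disp += tiles[(x, y)]
--             else:
--                 disp += " "
--         disp += "\n"
--     return disp
-- ===== SOURCE B (Python) =====
-- def disp_map(tiles, robot_x, robot_y):
--     min_x = min([0] + [x for x, _ in tiles])
--     max_x = max([0] + [x for x, _ in tiles])
--     min_y = min([0] + [y for _, y in tiles])
--     max_y = max([0] + [y for _, y in tiles])
--     w = max_x - min_x + 1
--     h = max_y - min_y + 1
--     grid = [[" "] * w for _ in range(h)]
--     for (x, y), c in tiles.items():
--         grid[y - min_y][x - min_x] = c
--     grid[0 - min_y][0 - min_x] = "C"
--     if min_x <= robot_x <= max_x and min_y <= robot_y <= max_y: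
--         grid[robot_y - min_y][robot_x - min_x] = "D"
--     out = ""
--     for row in grid:
--         out += "".join(row)
--         out += "\n"
--     return out
-- ===== Notes on version B (the rewrite author's own statement) =====
-- stated objective: alternative
-- what changed: B allocates a blank 2D grid once, writes each tile (then 'C', then a bounds-guarded 'D') directly into its cell, and joins the rows, instead of A's per-cell dict lookup inside a doubly nested loop over the whole bounding box.
import Mathlib
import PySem

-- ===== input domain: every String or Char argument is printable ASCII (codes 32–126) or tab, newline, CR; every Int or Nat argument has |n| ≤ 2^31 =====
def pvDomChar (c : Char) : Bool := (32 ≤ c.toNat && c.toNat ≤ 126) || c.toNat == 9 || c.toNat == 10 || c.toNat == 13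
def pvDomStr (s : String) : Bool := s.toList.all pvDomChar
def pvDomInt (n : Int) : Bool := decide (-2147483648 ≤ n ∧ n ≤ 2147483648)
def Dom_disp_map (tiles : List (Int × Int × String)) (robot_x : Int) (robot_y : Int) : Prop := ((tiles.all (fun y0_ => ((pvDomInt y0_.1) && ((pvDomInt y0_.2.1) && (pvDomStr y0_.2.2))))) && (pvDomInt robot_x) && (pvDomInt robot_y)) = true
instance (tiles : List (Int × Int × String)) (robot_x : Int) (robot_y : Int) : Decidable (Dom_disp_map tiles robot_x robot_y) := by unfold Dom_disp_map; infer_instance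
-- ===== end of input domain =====

-- B renders the map by writing each tile once into a pre-allocated 2D grid (then 'C', then a
-- bounds-guarded 'D') and joining the rows, instead of A's dict lookup at every cell of the box.

-- ===== PORT A =====
def disp_map (tiles : List (Int × Int × String)) (robot_x : Int) (robot_y : Int) : String :=
  -- min_x, max_x, min_y, max_y seeded at 0 and folded over the dict's keys
  let b := tiles.foldl
    (fun (b : Int × Int × Int × Int) key =>
      (min b.1 key.1, max b.2.1 key.1, min b.2.2.1 key.2.1, max b.2.2.2 key.2.1))
    ((0 : Int), (0 : Int), (0 : Int), (0 : Int))
  (PySem.List.pyRange b.2.2.1 (b.2.2.2 + 1) 1).foldl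
    (fun disp y =>
      ((PySem.List.pyRange b.1 (b.2.1 + 1) 1).foldl
        (fun disp x =>
          disp ++
            (if x = robot_x ∧ y = robot_y then "D"
             else if x = 0 ∧ y = 0 then "C"
             else
               -- '(x, y) in tiles' then 'tiles[(x, y)]': first matching entry of the assoc list
               match tiles.find? (fun t => t.1 == x && t.2.1 == y) with
               | some t => t.2.2
               | none => " "))
        disp) ++ "\n")
    ""

-- ===== PORT B =====
def disp_map_alt (tiles : List (Int × Int × String)) (robot_x : Int) (robot_y : Int) : String :=
  -- min([0] + [x for x, _ in tiles]) on Ints = fold of min seeded at 0 (exact; likewise max)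
  let min_x := (tiles.map (fun t => t.1)).foldl min 0
  let max_x := (tiles.map (fun t => t.1)).foldl max 0
  let min_y := (tiles.map (fun t => t.2.1)).foldl min 0
  let max_y := (tiles.map (fun t => t.2.1)).foldl max 0
  let w := (max_x - min_x + 1).toNat
  let h := (max_y - min_y + 1).toNat
  let grid0 := List.replicate h (List.replicate w " ")
  -- every write below is at a provably in-range nonnegative index, so plain set/modify is
  -- exact for Python's list assignment here
  let grid1 := tiles.foldl
    (fun g t => g.modify (t.2.1 - min_y).toNat (fun row => row.set (t.1 - min_x).toNat t.2.2))
    grid0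
  let grid2 := grid1.modify (0 - min_y).toNat (fun row => row.set (0 - min_x).toNat "C")
  let grid3 :=
    if min_x ≤ robot_x ∧ robot_x ≤ max_x ∧ min_y ≤ robot_y ∧ robot_y ≤ max_y then
      grid2.modify (robot_y - min_y).toNat (fun row => row.set (robot_x - min_x).toNat "D")
    else grid2
  -- '"".join(row)' = concatenation of the row's strings (exact)
  grid3.foldl (fun out row => out ++ row.foldl (· ++ ·) "" ++ "\n") ""

-- ===== PRECONDITION & SPEC =====
-- Pre_ excludes assoc lists with duplicate (x, y) keys: they cannot arise from the Python dict
-- `tiles`, and on them first-match lookup (A's port) and last-write-wins (B's port) may differ.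
def Pre_disp_map (tiles : List (Int × Int × String)) (_robot_x : Int) (_robot_y : Int) : Prop :=
  (tiles.map (fun t => (t.1, t.2.1))).Nodup
instance (tiles : List (Int × Int × String)) (robot_x : Int) (robot_y : Int) : Decidable (Pre_disp_map tiles robot_x robot_y) := by unfold Pre_disp_map; infer_instance

def pvWitness_disp_map : (List (Int × Int × String)) × Int × Int := ([(1, 0, "#"), (0, 1, ".")], 1, 0)

def Spec_disp_map (tiles : List (Int × Int × String)) (robot_x : Int) (robot_y : Int) (out : String) : Prop := out = disp_map_alt tiles robot_x robot_y
instance (tiles : List (Int × Int × String)) (robot_x : Int) (robot_y : Int) (out : String) : Decidable (Spec_disp_map tiles robot_x robot_y out) := by unfold Spec_disp_map; infer_instance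

-- ===== CLAIM (what is proved, stated in full; the proofs are below) =====
def Claim_equal_disp_map : Prop := ∀ (tiles : List (Int × Int × String)) (robot_x : Int) (robot_y : Int), Dom_disp_map tiles robot_x robot_y → Pre_disp_map tiles robot_x robot_y → Spec_disp_map tiles robot_x robot_y (disp_map tiles robot_x robot_y)

-- ===== LEMMAS AND PROOFS =====

-- string-concatenation helper and generic fold shapes
def sj (l : List String) : String := l.foldl (· ++ ·) ""

lemma foldl_str_init : ∀ (l : List String) (a : String), l.foldl (· ++ ·) a = a ++ sj l := by
  intro l
  induction l with
  | nil => intro a; simp [sj]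
  | cons x l ih =>
      intro a
      show (l.foldl (· ++ ·) (a ++ x)) = a ++ (x :: l).foldl (· ++ ·) ""
      rw [ih (a ++ x)]
      show a ++ x ++ sj l = a ++ (l.foldl (· ++ ·) ("" ++ x))
      rw [ih ("" ++ x)]
      simp [String.append_assoc]

lemma sj_cons (x : String) (l : List String) : sj (x :: l) = x ++ sj l := by
  show l.foldl (· ++ ·) ("" ++ x) = x ++ sj l
  rw [foldl_str_init l ("" ++ x)]
  simp

lemma sj_foldl {α : Type} (f : α → String) :
    ∀ (l : List α) (a : String), l.foldl (fun s x => s ++ f x) a = a ++ sj (l.map f) := by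
  intro l
  induction l with
  | nil => intro a; simp [sj]
  | cons x l ih =>
      intro a
      show l.foldl (fun s x => s ++ f x) (a ++ f x) = a ++ sj (f x :: l.map f)
      rw [ih, sj_cons, String.append_assoc]

lemma sj_foldl' {α : Type} (f : α → String) :
    ∀ (l : List α) (a : String),
      l.foldl (fun s x => s ++ f x ++ "\n") a = a ++ sj (l.map (fun x => f x ++ "\n")) := by
  intro l
  induction l with
  | nil => intro a; simp [sj]
  | cons x l ih =>
      intro a
      show l.foldl (fun s x => s ++ f x ++ "\n") (a ++ f x ++ "\n")
        = a ++ sj ((f x ++ "\n") :: l.map (fun x => f x ++ "\n"))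
      rw [ih, sj_cons]
      simp [String.append_assoc]

-- the per-cell value both programs draw
def pvCell (tiles : List (Int × Int × String)) (rx ry x y : Int) : String :=
  if x = rx ∧ y = ry then "D"
  else if x = 0 ∧ y = 0 then "C"
  else
    match tiles.find? (fun t => t.1 == x && t.2.1 == y) with
    | some t => t.2.2
    | none => " "

-- bounds helpers (B's four folds)
def pvMinX (tiles : List (Int × Int × String)) : Int := (tiles.map (fun t => t.1)).foldl min 0
def pvMaxX (tiles : List (Int × Int × String)) : Int := (tiles.map (fun t => t.1)).foldl max 0
def pvMinY (tiles : List (Int × Int × String)) : Int := (tiles.map (fun t => t.2.1)).foldl min 0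
def pvMaxY (tiles : List (Int × Int × String)) : Int := (tiles.map (fun t => t.2.1)).foldl max 0

lemma boundsA_aux :
    ∀ (l : List (Int × Int × String)) (a b c d : Int),
      l.foldl
        (fun (b : Int × Int × Int × Int) key =>
          (min b.1 key.1, max b.2.1 key.1, min b.2.2.1 key.2.1, max b.2.2.2 key.2.1))
        (a, b, c, d)
        = ((l.map (fun t => t.1)).foldl min a, (l.map (fun t => t.1)).foldl max b,
           (l.map (fun t => t.2.1)).foldl min c, (l.map (fun t => t.2.1)).foldl max d) := by
  intro l
  induction l with
  | nil => intro a b c d; rfl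
  | cons t l ih => intro a b c d; exact ih (min a t.1) (max b t.1) (min c t.2.1) (max d t.2.1)

lemma boundsA (tiles : List (Int × Int × String)) :
    tiles.foldl
      (fun (b : Int × Int × Int × Int) key =>
        (min b.1 key.1, max b.2.1 key.1, min b.2.2.1 key.2.1, max b.2.2.2 key.2.1))
      ((0 : Int), (0 : Int), (0 : Int), (0 : Int))
      = (pvMinX tiles, pvMaxX tiles, pvMinY tiles, pvMaxY tiles) := by
  exact boundsA_aux tiles 0 0 0 0

lemma foldl_min_le_init : ∀ (l : List Int) (a : Int), l.foldl min a ≤ a := by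
  intro l
  induction l with
  | nil => intro a; simp
  | cons x l ih => intro a; exact le_trans (ih (min a x)) (min_le_left a x)

lemma foldl_min_le_mem : ∀ (l : List Int) (a x : Int), x ∈ l → l.foldl min a ≤ x := by
  intro l
  induction l with
  | nil => intro a x hx; cases hx
  | cons y l ih =>
      intro a x hx
      rcases List.mem_cons.mp hx with h | h
      · subst h; exact le_trans (foldl_min_le_init l (min a x)) (min_le_right a x)
      · exact ih (min a y) x h

lemma foldl_max_ge_init : ∀ (l : List Int) (a : Int), a ≤ l.foldl max a := by
  intro l
  induction l with
  | nil => intro a; simp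
  | cons x l ih => intro a; exact le_trans (le_max_left a x) (ih (max a x))

lemma foldl_max_ge_mem : ∀ (l : List Int) (a x : Int), x ∈ l → x ≤ l.foldl max a := by
  intro l
  induction l with
  | nil => intro a x hx; cases hx
  | cons y l ih =>
      intro a x hx
      rcases List.mem_cons.mp hx with h | h
      · subst h; exact le_trans (le_max_right a x) (foldl_max_ge_init l (max a x))
      · exact ih (max a y) x h

-- grid helpers
def get2 (g : List (List String)) (i j : Nat) : Option String := g[i]?.bind (fun r => r[j]?)

def pvInv (g : List (List String)) (h w : Nat) : Prop := g.length = h ∧ ∀ r ∈ g, r.length = w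

def wr (g : List (List String)) (i j : Nat) (v : String) : List (List String) :=
  g.modify i (fun row => row.set j v)

lemma pvInv_wr {g : List (List String)} {h w : Nat} (hg : pvInv g h w) (i j : Nat) (v : String) :
    pvInv (wr g i j v) h w := by
  obtain ⟨hlen, hrow⟩ := hg
  constructor
  · rw [wr, List.length_modify, hlen]
  · intro r hr
    by_cases hi : i < g.length
    · rw [wr, List.modify_eq_set] at hr
      rcases List.mem_or_eq_of_mem_set hr with h' | h'
      · exact hrow r h'
      · subst h'
        rw [List.length_set]
        exact hrow _ (by
          have : g[i]?.getD default = g[i] := by simp [List.getElem?_eq_getElem hi]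
          rw [this]; exact List.getElem_mem hi)
    · rw [wr, List.modify_eq_self (by omega)] at hr
      exact hrow r hr

lemma get2_wr_eq {g : List (List String)} {h w : Nat} (hg : pvInv g h w)
    {i j : Nat} (hi : i < h) (hj : j < w) (v : String) : get2 (wr g i j v) i j = some v := by
  obtain ⟨hlen, hrow⟩ := hg
  have hi' : i < g.length := by omega
  have hr : g[i]? = some g[i] := List.getElem?_eq_getElem hi'
  have hjw : j < g[i].length := by rw [hrow g[i] (List.getElem_mem hi')]; exact hj
  simp [get2, wr, hr, hjw]

lemma get2_wr_ne {g : List (List String)} {i j i' j' : Nat}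
    (hne : ¬(i' = i ∧ j' = j)) (v : String) : get2 (wr g i j v) i' j' = get2 g i' j' := by
  by_cases hii : i = i'
  · subst hii
    have hjj : j' ≠ j := by tauto
    simp only [get2, wr, List.getElem?_modify]
    cases hx : g[i]? with
    | none => rfl
    | some r => simp [Ne.symm hjj]
  · simp only [get2, wr, List.getElem?_modify]
    cases hx : g[i']? with
    | none => simp
    | some r => simp [hii]

lemma find?_congr_mem {α : Type} {p q : α → Bool} :
    ∀ (l : List α), (∀ x ∈ l, p x = q x) → l.find? p = l.find? q := by
  intro l
  induction l with
  | nil => intro _; rfl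
  | cons x l ih =>
      intro h
      have hx := h x (List.mem_cons_self)
      by_cases hp : p x = true
      · rw [List.find?_cons_of_pos hp, List.find?_cons_of_pos (hx ▸ hp)]
      · rw [List.find?_cons_of_neg (by simpa using hp),
            List.find?_cons_of_neg (by rw [← hx]; simpa using hp)]
        exact ih (fun y hy => h y (List.mem_cons_of_mem x hy))

lemma get2_writes (min_x min_y : Int) (h w : Nat) :
    ∀ (l : List (Int × Int × String)) (g : List (List String)),
      pvInv g h w →
      (l.map (fun t => (t.1, t.2.1))).Nodup →
      (∀ t ∈ l, min_x ≤ t.1 ∧ min_y ≤ t.2.1 ∧ (t.2.1 - min_y).toNat < h ∧ (t.1 - min_x).toNat < w) →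
      ∀ (i j : Nat), i < h → j < w →
        get2 (l.foldl (fun g t => wr g (t.2.1 - min_y).toNat (t.1 - min_x).toNat t.2.2) g) i j
          = match l.find? (fun t => (t.2.1 - min_y).toNat == i && (t.1 - min_x).toNat == j) with
            | some t => some t.2.2
            | none => get2 g i j := by
  intro l
  induction l with
  | nil => intro g _ _ _ i j _ _; simp
  | cons t ts ih =>
      intro g hg hnd hb i j hi hj
      have hbt := hb t List.mem_cons_self
      have hg' := pvInv_wr hg (t.2.1 - min_y).toNat (t.1 - min_x).toNat t.2.2
      have hnd2 := List.nodup_cons.mp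
        (show ((t.1, t.2.1) :: ts.map (fun t => (t.1, t.2.1))).Nodup from hnd)
      have hnd' : (ts.map (fun t => (t.1, t.2.1))).Nodup := hnd2.2
      have hkey : (t.1, t.2.1) ∉ ts.map (fun t => (t.1, t.2.1)) := hnd2.1
      rw [List.foldl_cons,
          ih _ hg' hnd' (fun t' ht' => hb t' (List.mem_cons_of_mem t ht')) i j hi hj]
      by_cases hp : ((t.2.1 - min_y).toNat == i && (t.1 - min_x).toNat == j) = true
      · rw [show List.find? (fun t => (t.2.1 - min_y).toNat == i && (t.1 - min_x).toNat == j) (t :: ts)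
              = some t from List.find?_cons_of_pos hp]
        have hie : (t.2.1 - min_y).toNat = i ∧ (t.1 - min_x).toNat = j := by
          simpa [Bool.and_eq_true, beq_iff_eq] using hp
        have hnone : ts.find? (fun t => (t.2.1 - min_y).toNat == i && (t.1 - min_x).toNat == j) = none := by
          rw [List.find?_eq_none]
          intro t' ht' hpt'
          have hie' : (t'.2.1 - min_y).toNat = i ∧ (t'.1 - min_x).toNat = j := by
            simpa [Bool.and_eq_true, beq_iff_eq] using hpt'
          have hbt' := hb t' (List.mem_cons_of_mem t ht')
          have hx : t'.1 = t.1 := by omega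
          have hy : t'.2.1 = t.2.1 := by omega
          exact hkey (by
            have hm : (fun t => (t.1, t.2.1)) t' ∈ ts.map (fun t => (t.1, t.2.1)) :=
              List.mem_map_of_mem ht'
            simpa [hx, hy] using hm)
        rw [hnone]
        obtain ⟨hie1, hie2⟩ := hie
        rw [← hie1, ← hie2]
        exact get2_wr_eq hg (by omega) (by omega) t.2.2
      · rw [show List.find? (fun t => (t.2.1 - min_y).toNat == i && (t.1 - min_x).toNat == j) (t :: ts)
              = List.find? (fun t => (t.2.1 - min_y).toNat == i && (t.1 - min_x).toNat == j) ts
            from List.find?_cons_of_neg (by simpa using hp)]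
        cases hf : ts.find? (fun t => (t.2.1 - min_y).toNat == i && (t.1 - min_x).toNat == j) with
        | some t' => rfl
        | none =>
            exact get2_wr_ne (by
              intro hc
              exact hp (by simp [Bool.and_eq_true, beq_iff_eq]; omega)) t.2.2

-- the common row matrix
def pvRows (tiles : List (Int × Int × String)) (rx ry : Int) : List (List String) :=
  (PySem.List.pyRange (pvMinY tiles) (pvMaxY tiles + 1) 1).map
    (fun y => (PySem.List.pyRange (pvMinX tiles) (pvMaxX tiles + 1) 1).map
      (fun x => pvCell tiles rx ry x y))

lemma A_eq (tiles : List (Int × Int × String)) (rx ry : Int) :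
    disp_map tiles rx ry = sj ((pvRows tiles rx ry).map (fun r => sj r ++ "\n")) := by
  show (PySem.List.pyRange _ _ 1).foldl _ "" = _
  rw [show (tiles.foldl
      (fun (b : Int × Int × Int × Int) key =>
        (min b.1 key.1, max b.2.1 key.1, min b.2.2.1 key.2.1, max b.2.2.2 key.2.1))
      ((0 : Int), (0 : Int), (0 : Int), (0 : Int)))
    = (pvMinX tiles, pvMaxX tiles, pvMinY tiles, pvMaxY tiles) from boundsA tiles]
  simp only [sj_foldl]
  simp only [sj_foldl']
  simp only [pvRows, pvCell, List.map_map]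
  simp only [Function.comp_def]
  rfl

-- B's finished grid, as the proofs see it (definitionally the grid3 of disp_map_alt)
def pvGrid1 (tiles : List (Int × Int × String)) : List (List String) :=
  tiles.foldl
    (fun g t => wr g (t.2.1 - pvMinY tiles).toNat (t.1 - pvMinX tiles).toNat t.2.2)
    (List.replicate (pvMaxY tiles - pvMinY tiles + 1).toNat
      (List.replicate (pvMaxX tiles - pvMinX tiles + 1).toNat " "))

def pvGrid2 (tiles : List (Int × Int × String)) : List (List String) :=
  wr (pvGrid1 tiles) (0 - pvMinY tiles).toNat (0 - pvMinX tiles).toNat "C"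

def pvGrid3 (tiles : List (Int × Int × String)) (rx ry : Int) : List (List String) :=
  if pvMinX tiles ≤ rx ∧ rx ≤ pvMaxX tiles ∧ pvMinY tiles ≤ ry ∧ ry ≤ pvMaxY tiles then
    wr (pvGrid2 tiles) (ry - pvMinY tiles).toNat (rx - pvMinX tiles).toNat "D"
  else pvGrid2 tiles

lemma alt_eq (tiles : List (Int × Int × String)) (rx ry : Int) :
    disp_map_alt tiles rx ry
      = sj ((pvGrid3 tiles rx ry).map (fun r => sj r ++ "\n")) := by
  show (pvGrid3 tiles rx ry).foldl (fun out row => out ++ row.foldl (· ++ ·) "" ++ "\n") ""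
    = _
  simp only [sj_foldl']
  show "" ++ sj _ = _
  simp only [String.empty_append]
  rfl

lemma pvInv_grid0 (h w : Nat) : pvInv (List.replicate h (List.replicate w " ")) h w := by
  constructor
  · simp
  · intro r hr
    rw [List.eq_of_mem_replicate hr]
    simp

lemma get2_grid0 {h w i j : Nat} (hi : i < h) (hj : j < w) :
    get2 (List.replicate h (List.replicate w " ")) i j = some " " := by
  simp [get2, hi, hj]

lemma pvInv_writes (mx my : Int) (h w : Nat) :
    ∀ (l : List (Int × Int × String)) (g : List (List String)), pvInv g h w →
      pvInv (l.foldl (fun g t => wr g (t.2.1 - my).toNat (t.1 - mx).toNat t.2.2) g) h w := by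
  intro l
  induction l with
  | nil => intro g hg; exact hg
  | cons t ts ih => intro g hg; exact ih _ (pvInv_wr hg _ _ _)

lemma pvBoundsFacts (tiles : List (Int × Int × String)) :
    pvMinX tiles ≤ 0 ∧ 0 ≤ pvMaxX tiles ∧ pvMinY tiles ≤ 0 ∧ 0 ≤ pvMaxY tiles ∧
      ∀ t ∈ tiles, pvMinX tiles ≤ t.1 ∧ t.1 ≤ pvMaxX tiles ∧
        pvMinY tiles ≤ t.2.1 ∧ t.2.1 ≤ pvMaxY tiles := by
  refine ⟨foldl_min_le_init _ 0, foldl_max_ge_init _ 0,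
    foldl_min_le_init _ 0, foldl_max_ge_init _ 0, ?_⟩
  intro t ht
  exact ⟨foldl_min_le_mem _ 0 _ (List.mem_map_of_mem ht),
    foldl_max_ge_mem _ 0 _ (List.mem_map_of_mem ht),
    foldl_min_le_mem _ 0 _ (List.mem_map_of_mem ht),
    foldl_max_ge_mem _ 0 _ (List.mem_map_of_mem ht)⟩

lemma pvInv_pvGrid1 (tiles : List (Int × Int × String)) :
    pvInv (pvGrid1 tiles)
      (pvMaxY tiles - pvMinY tiles + 1).toNat (pvMaxX tiles - pvMinX tiles + 1).toNat :=
  pvInv_writes _ _ _ _ tiles _ (pvInv_grid0 _ _)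

lemma pvInv_pvGrid2 (tiles : List (Int × Int × String)) :
    pvInv (pvGrid2 tiles)
      (pvMaxY tiles - pvMinY tiles + 1).toNat (pvMaxX tiles - pvMinX tiles + 1).toNat :=
  pvInv_wr (pvInv_pvGrid1 tiles) _ _ _

lemma pvInv_pvGrid3 (tiles : List (Int × Int × String)) (rx ry : Int) :
    pvInv (pvGrid3 tiles rx ry)
      (pvMaxY tiles - pvMinY tiles + 1).toNat (pvMaxX tiles - pvMinX tiles + 1).toNat := by
  rw [pvGrid3]
  split
  · exact pvInv_wr (pvInv_pvGrid2 tiles) _ _ _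
  · exact pvInv_pvGrid2 tiles

lemma get2_pvGrid2 (tiles : List (Int × Int × String)) (rx ry : Int)
    (hnd : (tiles.map (fun t => (t.1, t.2.1))).Nodup) (i j : Nat)
    (hi : i < (pvMaxY tiles - pvMinY tiles + 1).toNat)
    (hj : j < (pvMaxX tiles - pvMinX tiles + 1).toNat)
    (hD : ¬(pvMinX tiles + (j : Int) = rx ∧ pvMinY tiles + (i : Int) = ry)) :
    get2 (pvGrid2 tiles) i j
      = some (pvCell tiles rx ry (pvMinX tiles + (j : Int)) (pvMinY tiles + (i : Int))) := by
  obtain ⟨hmx, hMx, hmy, hMy, htb⟩ := pvBoundsFacts tiles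
  rw [pvGrid2]
  by_cases hC : i = (0 - pvMinY tiles).toNat ∧ j = (0 - pvMinX tiles).toNat
  · obtain ⟨hC1, hC2⟩ := hC
    subst hC1; subst hC2
    rw [get2_wr_eq (pvInv_pvGrid1 tiles) (by omega) (by omega)]
    simp only [pvCell]
    rw [if_neg hD, if_pos ⟨by omega, by omega⟩]
  · rw [get2_wr_ne hC]
    rw [pvGrid1,
        get2_writes (pvMinX tiles) (pvMinY tiles) _ _ tiles _ (pvInv_grid0 _ _) hnd
          (fun t ht => by rcases htb t ht with ⟨h1, h2, h3, h4⟩; exact ⟨h1, h3, by omega, by omega⟩)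
          i j hi hj]
    have hfind :
        tiles.find? (fun t => (t.2.1 - pvMinY tiles).toNat == i && (t.1 - pvMinX tiles).toNat == j)
          = tiles.find? (fun t => t.1 == pvMinX tiles + (j : Int) && t.2.1 == pvMinY tiles + (i : Int)) := by
      apply find?_congr_mem
      intro t ht
      rcases htb t ht with ⟨h1, h2, h3, h4⟩
      apply Bool.coe_iff_coe.mp
      simp only [Bool.and_eq_true, beq_iff_eq]
      constructor <;> intro hh <;> [exact ⟨by omega, by omega⟩; exact ⟨by omega, by omega⟩]
    rw [hfind]
    have hC0 : ¬(pvMinX tiles + (j : Int) = 0 ∧ pvMinY tiles + (i : Int) = 0) := by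
      intro hh
      exact hC ⟨by omega, by omega⟩
    cases hf : tiles.find? (fun t => t.1 == pvMinX tiles + (j : Int) && t.2.1 == pvMinY tiles + (i : Int)) with
    | some t =>
        simp only [pvCell]
        rw [if_neg hD, if_neg hC0, hf]
    | none =>
        rw [get2_grid0 hi hj]
        simp only [pvCell]
        rw [if_neg hD, if_neg hC0, hf]

lemma get2_pvGrid3 (tiles : List (Int × Int × String)) (rx ry : Int)
    (hnd : (tiles.map (fun t => (t.1, t.2.1))).Nodup) (i j : Nat)
    (hi : i < (pvMaxY tiles - pvMinY tiles + 1).toNat)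
    (hj : j < (pvMaxX tiles - pvMinX tiles + 1).toNat) :
    get2 (pvGrid3 tiles rx ry) i j
      = some (pvCell tiles rx ry (pvMinX tiles + (j : Int)) (pvMinY tiles + (i : Int))) := by
  obtain ⟨hmx, hMx, hmy, hMy, htb⟩ := pvBoundsFacts tiles
  rw [pvGrid3]
  by_cases hr : pvMinX tiles ≤ rx ∧ rx ≤ pvMaxX tiles ∧ pvMinY tiles ≤ ry ∧ ry ≤ pvMaxY tiles
  · rw [if_pos hr]
    by_cases hij : i = (ry - pvMinY tiles).toNat ∧ j = (rx - pvMinX tiles).toNat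
    · obtain ⟨h1, h2⟩ := hij
      subst h1; subst h2
      rw [get2_wr_eq (pvInv_pvGrid2 tiles) (by omega) (by omega)]
      simp only [pvCell]
      rw [if_pos ⟨by omega, by omega⟩]
    · rw [get2_wr_ne hij]
      exact get2_pvGrid2 tiles rx ry hnd i j hi hj (by
        intro hh
        exact hij ⟨by omega, by omega⟩)
  · rw [if_neg hr]
    exact get2_pvGrid2 tiles rx ry hnd i j hi hj (by
      intro hh
      exact hr ⟨by omega, by omega, by omega, by omega⟩)

lemma get2_eq_getElem {g : List (List String)} {i j : Nat}
    (hi : i < g.length) (hj : j < g[i].length) : get2 g i j = some g[i][j] := by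
  simp [get2, hi, hj]

lemma grid3_eq_rows (tiles : List (Int × Int × String)) (rx ry : Int)
    (hnd : (tiles.map (fun t => (t.1, t.2.1))).Nodup) :
    pvGrid3 tiles rx ry = pvRows tiles rx ry := by
  obtain ⟨hmx, hMx, hmy, hMy, htb⟩ := pvBoundsFacts tiles
  obtain ⟨hlen, hrow⟩ := pvInv_pvGrid3 tiles rx ry
  have hlenR : (pvRows tiles rx ry).length = (pvMaxY tiles - pvMinY tiles + 1).toNat := by
    simp [pvRows, PySem.List.length_pyRange_one]
    omega
  apply List.ext_getElem (by omega)
  intro i hi hi'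
  have hiN : i < (pvMaxY tiles - pvMinY tiles + 1).toNat := by omega
  have hrowE : (pvRows tiles rx ry)[i]
      = (PySem.List.pyRange (pvMinX tiles) (pvMaxX tiles + 1) 1).map
          (fun x => pvCell tiles rx ry x (pvMinY tiles + (i : Int))) := by
    simp only [pvRows, List.getElem_map]
    rw [PySem.List.getElem_pyRange_one]
  rw [hrowE]
  have hgw : (pvGrid3 tiles rx ry)[i].length = (pvMaxX tiles - pvMinX tiles + 1).toNat :=
    hrow _ (List.getElem_mem hi)
  apply List.ext_getElem (by
    rw [hgw]
    simp [PySem.List.length_pyRange_one]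
    omega)
  intro j hj hj'
  have hjN : j < (pvMaxX tiles - pvMinX tiles + 1).toNat := by omega
  have h2 := get2_pvGrid3 tiles rx ry hnd i j hiN hjN
  rw [get2_eq_getElem hi hj] at h2
  have h3 : ((PySem.List.pyRange (pvMinX tiles) (pvMaxX tiles + 1) 1).map
      (fun x => pvCell tiles rx ry x (pvMinY tiles + (i : Int))))[j]
      = pvCell tiles rx ry (pvMinX tiles + (j : Int)) (pvMinY tiles + (i : Int)) := by
    simp only [List.getElem_map]
    rw [PySem.List.getElem_pyRange_one]
  rw [h3]
  exact Option.some.inj h2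

lemma B_eq (tiles : List (Int × Int × String)) (rx ry : Int)
    (hnd : (tiles.map (fun t => (t.1, t.2.1))).Nodup) :
    disp_map_alt tiles rx ry = sj ((pvRows tiles rx ry).map (fun r => sj r ++ "\n")) := by
  rw [alt_eq, grid3_eq_rows tiles rx ry hnd]

-- ===== VERDICT (by name: the statement is the Claim_ definition above) =====
theorem disp_map_spec : Claim_equal_disp_map := by
  intro tiles rx ry _ hpre
  show disp_map tiles rx ry = disp_map_alt tiles rx ry
  rw [A_eq, B_eq tiles rx ry hpre]
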